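-- pv_equiv track=rewrite | github.com/itsecd/isb-2026 | lab_1/task1/encrypt.py | alphabet_to_matrix
-- ===== SOURCE A (Python) =====
-- def alphabet_to_matrix(key: str) -> list[list]:
--     """Данная функция превращает набор символов в матрицу"""
--     alph_list = list(key)
--
--     matrix = [['' for _ in range(6)] for _ in range(6)]
--     ind = 0
--
--     for i in range(6):
--         for j in range(6):
--             if (ind < len(alph_list)):
--                 matrix[i][j] = alph_list[ind].upper()
--                 ind += 1
--
--
--     return matrix
-- ===== SOURCE B (Python) =====
-- def alphabet_to_matrix(key: str) -> list[list]:
--     """Flatten-pad-then-chunk: uppercase first 36 chars, pad to 36, slice into 6 rows."""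
--     flat = [c.upper() for c in key[:36]]
--     flat += [''] * (36 - len(flat))
--     return [flat[r * 6:(r + 1) * 6] for r in range(6)]
-- ===== Notes on version B (the rewrite author's own statement) =====
-- stated objective: simpler
-- what changed: Replaced the index-counter-driven nested 6x6 grid walk with a flatten-pad-then-chunk decomposition: uppercase key[:36], pad with empty strings to length 36, then slice into six rows.
import Mathlib
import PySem

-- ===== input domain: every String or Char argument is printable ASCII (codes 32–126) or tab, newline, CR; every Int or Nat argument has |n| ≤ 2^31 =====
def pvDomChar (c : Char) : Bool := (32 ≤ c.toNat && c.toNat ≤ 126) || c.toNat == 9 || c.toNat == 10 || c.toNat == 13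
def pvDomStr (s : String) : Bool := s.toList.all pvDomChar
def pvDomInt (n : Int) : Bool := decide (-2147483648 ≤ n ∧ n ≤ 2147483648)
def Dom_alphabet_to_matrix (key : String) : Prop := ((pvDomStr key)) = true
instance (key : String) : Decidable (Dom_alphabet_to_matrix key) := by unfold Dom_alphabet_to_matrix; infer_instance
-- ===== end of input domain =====

-- B replaces A's index-counter-driven nested 6x6 grid walk by a flatten-pad-then-chunk
-- decomposition (uppercase key[:36], pad with empty strings to 36, slice into six rows); objective: simpler.

-- ===== PORT A =====
def alphabet_to_matrix (key : String) : List (List String) :=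
  let alphList := key.toList
  let matrix : List (List String) :=
    (PySem.List.pyRange 0 6 1).map (fun _ => (PySem.List.pyRange 0 6 1).map (fun _ => ""))
  let res :=
    (PySem.List.pyRange 0 6 1).foldl (fun st i =>
      (PySem.List.pyRange 0 6 1).foldl (fun (st : List (List String) × Int) j =>
        if st.2 < (alphList.length : Int) then
          (st.1.modify i.toNat (fun row =>
              row.set j.toNat (PySem.Str.upper (String.singleton (PySem.List.pyGetD alphList st.2 ' ')))),
           st.2 + 1)
        else st) st)
      (matrix, 0)
  res.1

-- ===== PORT B =====
def alphabet_to_matrix_alt (key : String) : List (List String) :=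
  let flat := (PySem.Str.slice key none (some 36)).toList.map
      (fun c => PySem.Str.upper (String.singleton c))
  let flat2 := flat ++ List.replicate (36 - flat.length) ""
  (PySem.List.pyRange 0 6 1).map (fun r =>
    PySem.List.slice flat2 (some (r * 6)) (some ((r + 1) * 6)))

-- ===== PRECONDITION & SPEC =====
def Spec_alphabet_to_matrix (key : String) (out : List (List String)) : Prop := out = alphabet_to_matrix_alt key
instance (key : String) (out : List (List String)) : Decidable (Spec_alphabet_to_matrix key out) := by unfold Spec_alphabet_to_matrix; infer_instance

-- ===== CLAIM (what is proved, stated in full; the proofs are below) =====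
def Claim_equal_alphabet_to_matrix : Prop := ∀ (key : String), Dom_alphabet_to_matrix key → Spec_alphabet_to_matrix key (alphabet_to_matrix key)

-- ===== LEMMAS AND PROOFS =====

-- .upper() on a one-character string
def pvU (c : Char) : String := PySem.Str.upper (String.singleton c)

-- the 36 grid cells in row-major order, as A's two nested ranges produce them
def pvCells : List (Int × Int) :=
  (PySem.List.pyRange 0 6 1).flatMap (fun i => (PySem.List.pyRange 0 6 1).map (fun j => (i, j)))

-- A's loop body as a step function on the state (matrix, ind)
def pvStep (cs : List Char) (st : List (List String) × Int) (p : Int × Int) :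
    List (List String) × Int :=
  if st.2 < (cs.length : Int) then
    (st.1.modify p.1.toNat (fun row =>
        row.set p.2.toNat (PySem.Str.upper (String.singleton (PySem.List.pyGetD cs st.2 ' ')))),
     st.2 + 1)
  else st

-- the matrix after the first k cells have been visited
def pvMat (cs : List Char) (k : Nat) : List (List String) :=
  (List.range 6).map (fun r => (List.range 6).map (fun c =>
    if 6 * r + c < min k cs.length then pvU (PySem.List.pyGetD cs ((6 * r + c : Nat) : Int) ' ')
    else ""))

lemma pvCells_getElem? : ∀ k : Nat, k < 36 →
    pvCells[k]? = some (((k / 6 : Nat) : Int), ((k % 6 : Nat) : Int)) := by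
  decide

lemma pvMat_zero (cs : List Char) :
    (PySem.List.pyRange 0 6 1).map (fun _ => (PySem.List.pyRange 0 6 1).map (fun _ => "")) =
      pvMat cs 0 := by
  simp [pvMat]

lemma pvStep_eq (cs : List Char) (k : Nat) (hk : k < 36) :
    pvStep cs (pvMat cs k, ((min k cs.length : Nat) : Int)) (((k / 6 : Nat) : Int), ((k % 6 : Nat) : Int)) =
      (pvMat cs (k + 1), ((min (k + 1) cs.length : Nat) : Int)) := by
  by_cases h : k < cs.length
  · have hmin : min k cs.length = k := by omega
    have hmin1 : min (k + 1) cs.length = k + 1 := by omega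
    unfold pvStep
    rw [if_pos (by simp [hmin]; omega)]
    simp only [hmin, hmin1]
    refine Prod.ext ?_ ?_
    · apply List.ext_getElem
      · simp [pvMat]
      · intro r h1 h2
        simp only [List.length_modify, pvMat, List.length_map, List.length_range] at h1 h2
        rw [List.getElem_modify]
        simp only [pvMat, List.getElem_map, List.getElem_range]
        by_cases hr : (((k / 6 : Nat) : Int)).toNat = r
        · rw [if_pos hr]
          apply List.ext_getElem
          · simp
          · intro c hc1 hc2
            simp only [List.length_set, List.length_map, List.length_range] at hc1 hc2
            rw [List.getElem_set]
            simp only [List.getElem_map, List.getElem_range]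
            have hr' : r = k / 6 := by omega
            by_cases hcq : (((k % 6 : Nat) : Int)).toNat = c
            · have hc' : c = k % 6 := by omega
              rw [if_pos hcq]
              have : 6 * r + c = k := by omega
              rw [this, if_pos (by omega)]
              rfl
            · rw [if_neg hcq]
              have hne : 6 * r + c ≠ k := by omega
              by_cases hlt : 6 * r + c < k
              · rw [if_pos (by omega), if_pos (by omega)]
              · rw [if_neg (by omega), if_neg (by omega)]
        · rw [if_neg hr]
          have hrne : r ≠ k / 6 := by omega
          apply List.map_congr_left
          intro c hc
          have hc6 : c < 6 := List.mem_range.mp hc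
          have hne : 6 * r + c ≠ k := by omega
          by_cases hlt : 6 * r + c < k
          · rw [if_pos (by omega), if_pos (by omega)]
          · rw [if_neg (by omega), if_neg (by omega)]
    · push_cast; omega
  · have hmin : min k cs.length = cs.length := by omega
    have hmin1 : min (k + 1) cs.length = cs.length := by omega
    unfold pvStep
    rw [if_neg (by simp [hmin])]
    simp [pvMat, hmin, hmin1]

-- A's double fold over the two literal ranges is the single fold over the cell list
lemma pvDouble_eq (cs : List Char) (init : List (List String) × Int) :
    (PySem.List.pyRange 0 6 1).foldl (fun st i =>
        (PySem.List.pyRange 0 6 1).foldl (fun (st : List (List String) × Int) j =>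
          if st.2 < (cs.length : Int) then
            (st.1.modify i.toNat (fun row =>
                row.set j.toNat (PySem.Str.upper (String.singleton (PySem.List.pyGetD cs st.2 ' ')))),
             st.2 + 1)
          else st) st) init
    = pvCells.foldl (pvStep cs) init := by
  rw [pvCells, List.foldl_flatMap]
  simp only [List.foldl_map]
  rfl

-- loop invariant: after the first k cells, the state is (pvMat cs k, min k |cs|)
lemma pvFold_from (cs : List Char) :
    ∀ m k : Nat, k + m = 36 →
      (pvCells.drop k).foldl (pvStep cs) (pvMat cs k, ((min k cs.length : Nat) : Int)) =
        (pvMat cs 36, ((min 36 cs.length : Nat) : Int)) := by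
  intro m
  induction m with
  | zero =>
      intro k hk
      have hk36 : k = 36 := by omega
      subst hk36
      have : pvCells.drop 36 = [] := by decide
      simp [this]
  | succ m ih =>
      intro k hk
      have hklt : k < 36 := by omega
      have hlen : k < pvCells.length := by
        have : pvCells.length = 36 := by decide
        omega
      rw [List.drop_eq_getElem_cons hlen, List.foldl_cons]
      have hget : pvCells[k] = (((k / 6 : Nat) : Int), ((k % 6 : Nat) : Int)) := by
        have := pvCells_getElem? k hklt
        rw [List.getElem?_eq_getElem hlen] at this
        exact Option.some.inj this
      rw [hget, pvStep_eq cs k hklt]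
      exact ih (k + 1) (by omega)

lemma pvA_eq (key : String) : alphabet_to_matrix key = pvMat key.toList 36 := by
  show ((PySem.List.pyRange 0 6 1).foldl (fun st i =>
      (PySem.List.pyRange 0 6 1).foldl (fun (st : List (List String) × Int) j =>
        if st.2 < (key.toList.length : Int) then
          (st.1.modify i.toNat (fun row =>
              row.set j.toNat (PySem.Str.upper (String.singleton (PySem.List.pyGetD key.toList st.2 ' ')))),
           st.2 + 1)
        else st) st)
      ((PySem.List.pyRange 0 6 1).map (fun _ => (PySem.List.pyRange 0 6 1).map (fun _ => "")), 0)).1 = pvMat key.toList 36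
  rw [pvDouble_eq key.toList, pvMat_zero key.toList]
  have h0 : ((0 : Int)) = ((min 0 key.toList.length : Nat) : Int) := by simp
  rw [h0]
  have h := pvFold_from key.toList 36 0 rfl
  rw [List.drop_zero] at h
  rw [h]

lemma pvB_eq (key : String) : alphabet_to_matrix_alt key = pvMat key.toList 36 := by
  unfold alphabet_to_matrix_alt pvMat
  set cs := key.toList with hcs
  have hflat : (PySem.Str.slice key none (some 36)).toList.map
      (fun c => PySem.Str.upper (String.singleton c)) = (cs.take 36).map pvU := by
    simp [PySem.Str.toList_slice, PySem.List.slice_to]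
    rfl
  rw [hflat]
  have hlen : ((cs.take 36).map pvU).length = min 36 cs.length := by simp
  have hlen2 : (((cs.take 36).map pvU) ++ List.replicate (36 - ((cs.take 36).map pvU).length) "").length = 36 := by
    simp
  have hpr : PySem.List.pyRange 0 6 1 = (List.range 6).map (fun n : Nat => (n : Int)) := by decide
  rw [hpr, List.map_map]
  apply List.map_congr_left
  intro r hr
  have hr6 : r < 6 := List.mem_range.mp hr
  simp only [Function.comp]
  have e1 : ((r : Int)) * 6 = ((r * 6 : Nat) : Int) := by push_cast; ring
  have e2 : ((r : Int) + 1) * 6 = ((r * 6 + 6 : Nat) : Int) := by push_cast; ring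
  rw [e1, e2, PySem.List.slice_natCast]
  apply List.ext_getElem
  · simp
    omega
  · intro c hc1 hc2
    simp only [List.length_take, List.length_drop] at hc1
    simp only [List.length_map, List.length_range] at hc2
    rw [List.getElem_take, List.getElem_drop]
    simp only [List.getElem_map, List.getElem_range]
    by_cases h : r * 6 + c < ((cs.take 36).map pvU).length
    · rw [List.getElem_append_left h]
      have hlt : 6 * r + c < min 36 cs.length := by rw [hlen] at h; omega
      rw [if_pos hlt]
      simp only [List.getElem_map, List.getElem_take]
      have hk : 6 * r + c < cs.length := by omega
      rw [PySem.List.pyGetD_eq_getElem _ _ (by exact Int.natCast_nonneg _) (by push_cast; omega)]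
      simp only [Int.toNat_natCast]
      have hidx : r * 6 + c = 6 * r + c := by omega
      simp [hidx]
    · rw [List.getElem_append_right (by omega)]
      have hge : ¬ (6 * r + c < min 36 cs.length) := by rw [hlen] at h; omega
      rw [if_neg hge]
      simp

-- ===== VERDICT (by name: the statement is the Claim_ definition above) =====
theorem alphabet_to_matrix_spec : Claim_equal_alphabet_to_matrix := by
  intro key _
  unfold Spec_alphabet_to_matrix
  rw [pvA_eq, pvB_eq]
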